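-- pv_equiv track=rewrite | github.com/CantBeSubh/ProgrammingProjects | Placement/Array/09MoveNegativeElm.py | swapMe2
-- ===== SOURCE A (Python) =====
-- def swapMe2(arr):
--     new_arr=[]
--     p=[]
--     n=[]
--     for i in arr:
--         if i>0:
--             p.append(i)
--         else:
--             n.append(i)
--
--     new_arr.extend(p)
--     new_arr.extend(n)
--     return new_arr
-- ===== SOURCE B (Python) =====
-- def swapMe2(arr):
--     # stable sort: positives (key False) first in order, the rest (key True) after, in order
--     return sorted(arr, key=lambda x: x <= 0)
-- ===== Notes on version B (the rewrite author's own statement) =====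
-- stated objective: idiomatic
-- what changed: Replaced the three-list partition-and-extend loop with a single stable sort keyed by the boolean x <= 0, relying on sort stability to keep positives first and both groups in original order.
import Mathlib
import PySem

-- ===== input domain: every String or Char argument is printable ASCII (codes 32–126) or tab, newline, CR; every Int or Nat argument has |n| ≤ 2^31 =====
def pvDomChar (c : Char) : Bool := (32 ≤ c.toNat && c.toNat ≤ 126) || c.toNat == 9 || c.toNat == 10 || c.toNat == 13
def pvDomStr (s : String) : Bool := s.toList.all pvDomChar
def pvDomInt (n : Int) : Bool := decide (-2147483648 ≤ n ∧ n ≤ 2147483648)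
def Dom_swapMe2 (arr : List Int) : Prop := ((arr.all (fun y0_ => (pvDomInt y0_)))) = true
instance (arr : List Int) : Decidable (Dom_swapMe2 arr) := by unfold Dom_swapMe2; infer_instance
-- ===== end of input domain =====

-- B replaces A's partition-into-two-lists loop by a single stable sort keyed by (x <= 0); same return value, idiomatic one-liner.


-- ===== PORT A =====
-- loop builds p (positives) and n (the rest) in order; new_arr = [] extended by p then n
def swapMe2 (arr : List Int) : List Int :=
  let pn := arr.foldl (fun (s : List Int × List Int) i =>
    if i > 0 then (s.1 ++ [i], s.2) else (s.1, s.2 ++ [i])) ([], [])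
  ([] : List Int) ++ pn.1 ++ pn.2

-- ===== PORT B =====
-- sorted(arr, key=lambda x: x <= 0)
def swapMe2_alt (arr : List Int) : List Int :=
  PySem.List.sorted arr (fun x => decide (x ≤ 0))

-- ===== PRECONDITION & SPEC =====
def Spec_swapMe2 (arr : List Int) (out : List Int) : Prop := out = swapMe2_alt arr
instance (arr : List Int) (out : List Int) : Decidable (Spec_swapMe2 arr out) := by unfold Spec_swapMe2; infer_instance

-- ===== CLAIM (what is proved, stated in full; the proofs are below) =====
def Claim_equal_swapMe2 : Prop := ∀ (arr : List Int), Dom_swapMe2 arr → Spec_swapMe2 arr (swapMe2 arr)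

-- ===== LEMMAS AND PROOFS =====

-- inserting a positive element lands right between the positive prefix and the non-positive suffix
lemma ins_pos (x : Int) (hx : 0 < x) (p n : List Int)
    (hp : ∀ y ∈ p, 0 < y) (hn : ∀ y ∈ n, y ≤ 0) :
    PySem.List.insertBy
      (fun a b => decide ((decide (a ≤ 0) : Bool) < (decide (b ≤ 0) : Bool))) x (p ++ n)
      = (p ++ [x]) ++ n := by
  induction p with
  | nil =>
    cases n with
    | nil => simp [PySem.List.insertBy]
    | cons y t =>
      have hy : y ≤ 0 := hn y (by simp)
      simp [PySem.List.insertBy, hy, show ¬ x ≤ 0 by omega]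
  | cons z p ih =>
    have hz : 0 < z := hp z (by simp)
    have : ∀ y ∈ p, 0 < y := fun y hy => hp y (by simp [hy])
    simp [PySem.List.insertBy, show ¬ z ≤ 0 by omega, ih this]

-- inserting a non-positive element appends it at the end
lemma ins_nonpos (x : Int) (hx : x ≤ 0) (ys : List Int) :
    PySem.List.insertBy
      (fun a b => decide ((decide (a ≤ 0) : Bool) < (decide (b ≤ 0) : Bool))) x ys
      = ys ++ [x] := by
  apply PySem.List.insertBy_of_forall_not_before
  intro y hy
  simp [hx]

-- loop invariant tying B's insertion-sort fold to A's two-accumulator fold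
lemma fold_inv (xs : List Int) : ∀ (p n : List Int),
    (∀ y ∈ p, 0 < y) → (∀ y ∈ n, y ≤ 0) →
    xs.foldl (fun acc x =>
      PySem.List.insertBy
        (fun a b => decide ((decide (a ≤ 0) : Bool) < (decide (b ≤ 0) : Bool))) x acc) (p ++ n)
    = (xs.foldl (fun (s : List Int × List Int) i =>
        if i > 0 then (s.1 ++ [i], s.2) else (s.1, s.2 ++ [i])) (p, n)).1
      ++ (xs.foldl (fun (s : List Int × List Int) i =>
        if i > 0 then (s.1 ++ [i], s.2) else (s.1, s.2 ++ [i])) (p, n)).2 := by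
  induction xs with
  | nil => intro p n _ _; simp
  | cons x xs ih =>
    intro p n hp hn
    by_cases hx : 0 < x
    · have h1 : ∀ y ∈ p ++ [x], 0 < y := by
        intro y hy; rcases List.mem_append.mp hy with h | h
        · exact hp y h
        · simp at h; omega
      simp only [List.foldl_cons, if_pos hx, ins_pos x hx p n hp hn]
      exact ih (p ++ [x]) n h1 hn
    · have hx' : x ≤ 0 := by omega
      have h2 : ∀ y ∈ n ++ [x], y ≤ 0 := by
        intro y hy; rcases List.mem_append.mp hy with h | h
        · exact hn y h
        · simp at h; omega
      simp only [List.foldl_cons, if_neg hx, ins_nonpos x hx' (p ++ n), List.append_assoc]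
      exact ih p (n ++ [x]) hp h2

-- ===== VERDICT (by name: the statement is the Claim_ definition above) =====
theorem swapMe2_spec : Claim_equal_swapMe2 := by
  intro arr _
  show swapMe2 arr = swapMe2_alt arr
  have h := fold_inv arr [] [] (by simp) (by simp)
  simp only [List.nil_append] at h
  simp [swapMe2, swapMe2_alt, PySem.List.sorted_eq_foldl_insertBy, h]
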